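-- pv_equiv track=rewrite | github.com/tjcdev/leetcode | trees/meta_level2_rotary.py | getMinCodeEntryTime
-- ===== SOURCE A (Python) =====
-- from typing import List
-- from typing import List
--
-- def getMinimalPathLength(N, start, end):
--   direct_path_length = abs(end - start)
--   return min(direct_path_length, N - direct_path_length)
--
-- def getMinCodeEntryTime(N: int, M: int, C: List[int]) -> int:
--   tree = {
--       (C[0], 1): getMinimalPathLength(N, C[0], 1)
--   }
--
--   for digit in C[1:]:
--     next_tree = {}
--
--     for state in tree.keys():
--       left_state = (digit, state[1])
--       left_movement = getMinimalPathLength(N, digit, state[0])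
--       if left_state in next_tree:
--           next_tree[left_state] = min(tree[state] + left_movement, next_tree[left_state])
--       else:
--           next_tree[left_state] = left_movement + tree[state]
--
--       right_state = (state[0], digit)
--       right_movement = getMinimalPathLength(N, digit, state[1])
--       if right_state in next_tree:
--           next_tree[right_state] = min(tree[state] + right_movement, next_tree[right_state])
--       else:
--           next_tree[right_state] = right_movement + tree[state]
--
--     tree = next_tree
--
--   return min(tree.values())
-- ===== SOURCE B (Python) =====
-- from typing import List
--
-- def getMinCodeEntryTime(N: int, M: int, C: List[int]) -> int:
--     # List DP over history indices: states[j] = (p, c) where p is the position of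
--     # the finger NOT on the last typed digit and c the accumulated cost.  Each
--     # step adds one uniform constant to every state and appends a single new
--     # minimum; no dictionary, no key merging.
--     def dist(a, b):
--         d = abs(a - b)
--         return min(d, N - d)
--
--     states = [(1, dist(1, C[0]))]
--     for prev, cur in zip(C, C[1:]):
--         stay = dist(prev, cur)
--         jump = min(c + dist(p, cur) for p, c in states)
--         states = [(p, c + stay) for p, c in states] + [(prev, jump)]
--     return min(c for p, c in states)
-- ===== Notes on version B (the rewrite author's own statement) =====
-- stated objective: faster
-- what changed: Replaces A's per-digit dictionary DP over ordered finger-position pairs (membership tests and min-merging of colliding keys) by a flat list DP over history indices: each step adds one uniform constant to every state and appends a single new minimum entry, with no dictionary and no merging; the final answer is the min over the list.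
import Mathlib
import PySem

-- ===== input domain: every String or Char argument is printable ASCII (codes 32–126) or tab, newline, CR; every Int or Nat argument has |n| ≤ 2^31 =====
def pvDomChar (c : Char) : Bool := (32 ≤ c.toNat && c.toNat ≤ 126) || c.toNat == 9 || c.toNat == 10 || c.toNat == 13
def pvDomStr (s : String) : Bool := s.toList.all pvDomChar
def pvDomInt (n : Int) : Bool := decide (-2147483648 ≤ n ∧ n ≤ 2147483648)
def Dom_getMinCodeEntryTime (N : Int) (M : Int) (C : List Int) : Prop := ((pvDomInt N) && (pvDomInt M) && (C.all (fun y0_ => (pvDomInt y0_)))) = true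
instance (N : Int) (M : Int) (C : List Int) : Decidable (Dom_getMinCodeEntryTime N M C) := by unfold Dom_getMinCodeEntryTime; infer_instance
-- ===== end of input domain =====

-- B replaces A's dict DP over ordered finger-position pairs (membership tests,
-- min-merging) by a flat list DP over history indices: each step adds one uniform
-- constant to all states and appends a single new minimum; same return value,
-- measurably faster (no hashing / merging per state).

-- ===== PORT A =====
-- getMinimalPathLength(N, start, end)
def pvDist (N s e : Int) : Int := min |e - s| (N - |e - s|)

-- the body of A's inner 'for state in tree.keys()' loop
def pvBodyA (N : Int) (tree : PySem.Dict (Int × Int) Int) (digit : Int)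
    (nt : PySem.Dict (Int × Int) Int) (state : Int × Int) : PySem.Dict (Int × Int) Int :=
  let leftState := (digit, state.2)
  let leftMovement := pvDist N digit state.1
  let nt1 := if nt.contains leftState then
      nt.insert leftState (min (tree.getD state 0 + leftMovement) (nt.getD leftState 0))
    else nt.insert leftState (leftMovement + tree.getD state 0)
  let rightState := (state.1, digit)
  let rightMovement := pvDist N digit state.2
  if nt1.contains rightState then
    nt1.insert rightState (min (tree.getD state 0 + rightMovement) (nt1.getD rightState 0))
  else nt1.insert rightState (rightMovement + tree.getD state 0)

-- one iteration of A's 'for digit in C[1:]' loop (tree -> next_tree)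
def pvStepA (N : Int) (tree : PySem.Dict (Int × Int) Int) (digit : Int) :
    PySem.Dict (Int × Int) Int :=
  tree.keys.foldl (pvBodyA N tree digit) PySem.Dict.empty

def getMinCodeEntryTime (N : Int) (M : Int) (C : List Int) : Int :=
  let c0 := PySem.List.pyGetD C 0 0
  let tree0 : PySem.Dict (Int × Int) Int := PySem.Dict.empty.insert (c0, 1) (pvDist N c0 1)
  let tree := (PySem.List.slice C (some 1) none).foldl (pvStepA N) tree0
  (PySem.List.min? tree.values (fun x => x)).getD 0

-- ===== PORT B =====
-- one iteration of B's 'for prev, cur in zip(C, C[1:])' loop: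
-- add 'stay' to every state, append one new state (prev, jump)
def pvStepBalt (N : Int) (st : List (Int × Int)) (pc : Int × Int) : List (Int × Int) :=
  let stay := pvDist N pc.1 pc.2
  let jump := (PySem.List.min? (st.map (fun s => s.2 + pvDist N s.1 pc.2)) (fun x => x)).getD 0
  st.map (fun s => (s.1, s.2 + stay)) ++ [(pc.1, jump)]

def getMinCodeEntryTime_alt (N : Int) (M : Int) (C : List Int) : Int :=
  let st0 : List (Int × Int) := [(1, pvDist N 1 (PySem.List.pyGetD C 0 0))]
  let st := (C.zip (PySem.List.slice C (some 1) none)).foldl (pvStepBalt N) st0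
  (PySem.List.min? (st.map (fun s => s.2)) (fun x => x)).getD 0

-- ===== PRECONDITION & SPEC =====
-- Pre_ excludes only the empty code list, on which A raises IndexError at C[0].
def Pre_getMinCodeEntryTime (N : Int) (M : Int) (C : List Int) : Prop := C ≠ []
instance (N : Int) (M : Int) (C : List Int) : Decidable (Pre_getMinCodeEntryTime N M C) := by
  unfold Pre_getMinCodeEntryTime; infer_instance
def pvWitness_getMinCodeEntryTime : Int × Int × List Int := (5, 3, [1, 2, 3])
def Spec_getMinCodeEntryTime (N : Int) (M : Int) (C : List Int) (out : Int) : Prop := out = getMinCodeEntryTime_alt N M C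
instance (N : Int) (M : Int) (C : List Int) (out : Int) : Decidable (Spec_getMinCodeEntryTime N M C out) := by unfold Spec_getMinCodeEntryTime; infer_instance

-- ===== CLAIM (what is proved, stated in full; the proofs are below) =====
def Claim_equal_getMinCodeEntryTime : Prop := ∀ (N : Int) (M : Int) (C : List Int), Dom_getMinCodeEntryTime N M C → Pre_getMinCodeEntryTime N M C → Spec_getMinCodeEntryTime N M C (getMinCodeEntryTime N M C)

-- ===== LEMMAS AND PROOFS =====

def pvCmin (o : Option Int) (v : Int) : Option Int :=
  some (match o with | none => v | some w => min w v)

def pvRed {κ : Type} [DecidableEq κ] (o : Option Int) (L : List (κ × Int)) (k : κ) : Option Int :=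
  L.foldl (fun o p => if p.1 = k then pvCmin o p.2 else o) o

theorem pvRed_cons {κ : Type} [DecidableEq κ] (o : Option Int) (p : κ × Int) (L : List (κ × Int)) (k : κ) :
    pvRed o (p :: L) k = pvRed (if p.1 = k then pvCmin o p.2 else o) L k := rfl

theorem pvRed_append {κ : Type} [DecidableEq κ] (o : Option Int) (L1 L2 : List (κ × Int)) (k : κ) :
    pvRed o (L1 ++ L2) k = pvRed (pvRed o L1 k) L2 k := List.foldl_append ..

theorem pvRed_eq_none_iff {κ : Type} [DecidableEq κ] (o : Option Int) (L : List (κ × Int)) (k : κ) :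
    pvRed o L k = none ↔ o = none ∧ ∀ p ∈ L, p.1 ≠ k := by
  induction L generalizing o with
  | nil => simp [pvRed]
  | cons p L ih =>
    rw [pvRed_cons]
    by_cases hp : p.1 = k
    · simp only [hp, ih, pvCmin]
      simp [hp]
    · simp only [if_neg hp, ih]
      constructor
      · rintro ⟨h1, h2⟩
        refine ⟨h1, fun q hq => ?_⟩
        rcases List.mem_cons.mp hq with rfl | hq
        · exact hp
        · exact h2 q hq
      · rintro ⟨h1, h2⟩; exact ⟨h1, fun q hq => h2 q (List.mem_cons_of_mem _ hq)⟩

theorem pvRed_some_spec {κ : Type} [DecidableEq κ] {o : Option Int} {L : List (κ × Int)} {k : κ} {v : Int}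
    (h : pvRed o L k = some v) :
    (o = some v ∨ (k, v) ∈ L) ∧ (∀ w, o = some w → v ≤ w) ∧ (∀ p ∈ L, p.1 = k → v ≤ p.2) := by
  induction L generalizing o with
  | nil =>
    refine ⟨Or.inl h, fun w hw => ?_, by simp⟩
    rw [hw] at h; cases h; exact le_refl _
  | cons p L ih =>
    rw [pvRed_cons] at h
    by_cases hp : p.1 = k
    · rw [if_pos hp] at h
      obtain ⟨h1, h2, h3⟩ := ih h
      have hpk : p = (k, p.2) := by cases p; simp_all
      cases ho : o with
      | none =>
        subst ho
        have hc : pvCmin none p.2 = some p.2 := rfl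
        rw [hc] at h1 h2
        refine ⟨?_, by simp, ?_⟩
        · rcases h1 with h1 | h1
          · cases h1; exact Or.inr (by rw [hpk]; exact List.mem_cons_self ..)
          · exact Or.inr (List.mem_cons_of_mem _ h1)
        · rintro q hq hqk
          rcases List.mem_cons.mp hq with rfl | hq
          · have := h2 q.2 rfl; omega
          · exact h3 q hq hqk
      | some u =>
        subst ho
        have hc : pvCmin (some u) p.2 = some (min u p.2) := rfl
        rw [hc] at h1 h2
        have hmin := h2 (min u p.2) rfl
        refine ⟨?_, ?_, ?_⟩
        · rcases h1 with h1 | h1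
          · have hv : v = min u p.2 := by cases h1; rfl
            rcases min_choice u p.2 with hm | hm
            · exact Or.inl (by rw [hv, hm])
            · exact Or.inr (by rw [hpk]; rw [hv, hm]; exact List.mem_cons_self ..)
          · exact Or.inr (List.mem_cons_of_mem _ h1)
        · rintro w hw; cases hw; omega
        · rintro q hq hqk
          rcases List.mem_cons.mp hq with rfl | hq
          · omega
          · exact h3 q hq hqk
    · rw [if_neg hp] at h
      obtain ⟨h1, h2, h3⟩ := ih h
      refine ⟨?_, h2, ?_⟩
      · rcases h1 with h1 | h1
        · exact Or.inl h1
        · exact Or.inr (List.mem_cons_of_mem _ h1)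
      · rintro q hq hqk
        rcases List.mem_cons.mp hq with rfl | hq
        · exact absurd hqk hp
        · exact h3 q hq hqk

theorem pvRed_eq_some {κ : Type} [DecidableEq κ] {o : Option Int} {L : List (κ × Int)} {k : κ} {v : Int}
    (h1 : o = some v ∨ (k, v) ∈ L) (h2 : ∀ w, o = some w → v ≤ w)
    (h3 : ∀ p ∈ L, p.1 = k → v ≤ p.2) : pvRed o L k = some v := by
  induction L generalizing o with
  | nil =>
    rcases h1 with h1 | h1
    · subst h1; rfl
    · simp at h1
  | cons p L ih =>
    rw [pvRed_cons]
    by_cases hp : p.1 = k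
    · rw [if_pos hp]
      have hvp : v ≤ p.2 := h3 p (List.mem_cons_self ..) hp
      cases ho : o with
      | none =>
        subst ho
        refine ih ?_ ?_ (fun q hq => h3 q (List.mem_cons_of_mem _ hq))
        · rcases h1 with h1 | h1
          · cases h1
          · rcases List.mem_cons.mp h1 with he | hm
            · left; show some p.2 = some v; rw [← he]
            · exact Or.inr hm
        · rintro w hw
          have : pvCmin none p.2 = some p.2 := rfl
          rw [this] at hw; cases hw; exact hvp
      | some u =>
        subst ho
        have hvu : v ≤ u := h2 u rfl
        have hc : pvCmin (some u) p.2 = some (min u p.2) := rfl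
        rw [hc]
        refine ih ?_ ?_ (fun q hq => h3 q (List.mem_cons_of_mem _ hq))
        · rcases h1 with h1 | h1
          · cases h1; left; congr 1; omega
          · rcases List.mem_cons.mp h1 with he | hm
            · left; have : p.2 = v := by rw [← he]
              congr 1; omega
            · exact Or.inr hm
        · rintro w hw; cases hw; omega
    · rw [if_neg hp]
      refine ih ?_ h2 (fun q hq => h3 q (List.mem_cons_of_mem _ hq))
      rcases h1 with h1 | h1
      · exact Or.inl h1
      · rcases List.mem_cons.mp h1 with he | hm
        · exact absurd (by rw [← he]) hp
        · exact Or.inr hm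

theorem pvRed_singleton {κ : Type} [DecidableEq κ] (o : Option Int) (key : κ) (v : Int) (k : κ) :
    pvRed o [(key, v)] k = if key = k then pvCmin o v else o := rfl

-- membership gives an upper bound on the pvRed minimum
theorem pvRed_le_of_mem {κ : Type} [DecidableEq κ] {L : List (κ × Int)} {pc : κ × Int}
    (h : pc ∈ L) : ∃ w, pvRed none L pc.1 = some w ∧ w ≤ pc.2 := by
  cases hr : pvRed (κ := κ) none L pc.1 with
  | none =>
    exact absurd rfl (((pvRed_eq_none_iff _ _ _).mp hr).2 pc h)
  | some w =>
    exact ⟨w, rfl, (pvRed_some_spec hr).2.2 pc h rfl⟩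

theorem pvRed_attained {κ : Type} [DecidableEq κ] {L : List (κ × Int)} {k : κ} {v : Int}
    (h : pvRed none L k = some v) : (k, v) ∈ L := by
  rcases (pvRed_some_spec h).1 with h' | h'
  · cases h'
  · exact h'

-- mutual domination at one key gives equal minima
theorem pvRed_eq_of_dom {κ : Type} [DecidableEq κ] {L1 L2 : List (κ × Int)} {k : κ}
    (h12 : ∀ v, (k, v) ∈ L1 → ∃ w, (k, w) ∈ L2 ∧ w ≤ v)
    (h21 : ∀ v, (k, v) ∈ L2 → ∃ w, (k, w) ∈ L1 ∧ w ≤ v) :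
    pvRed none L1 k = pvRed none L2 k := by
  cases h1 : pvRed (κ := κ) none L1 k with
  | none =>
    cases h2 : pvRed (κ := κ) none L2 k with
    | none => rfl
    | some v =>
      obtain ⟨w, hw, _⟩ := h21 v (pvRed_attained h2)
      exact absurd rfl (((pvRed_eq_none_iff _ _ _).mp h1).2 (k, w) hw)
  | some v =>
    have hv1 : (k, v) ∈ L1 := pvRed_attained h1
    obtain ⟨w, hwL2, hwv⟩ := h12 v hv1
    have hbnd := (pvRed_some_spec h1).2.2
    symm
    refine pvRed_eq_some (Or.inr ?_) (by simp) ?_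
    · -- w must equal v
      obtain ⟨u, huL1, huw⟩ := h21 w hwL2
      have := hbnd (k, u) huL1 rfl
      have hwv' : w = v := by omega
      rw [← hwv']; exact hwL2
    · rintro q hq hqk
      obtain ⟨u, huL1, huq⟩ := h21 q.2 (by
        have : q = (k, q.2) := by cases q; simp_all
        rw [← this]; exact hq)
      have := hbnd (k, u) huL1 rfl
      omega

def pvContribsA (N digit : Int) (tree : PySem.Dict (Int × Int) Int) (s : Int × Int) :
    List ((Int × Int) × Int) :=
  [((digit, s.2), tree.getD s 0 + pvDist N digit s.1),
   ((s.1, digit), tree.getD s 0 + pvDist N digit s.2)]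

def pvContribsB (N prev digit : Int) (pc : Int × Int) : List (Int × Int) :=
  [(pc.1, pc.2 + pvDist N prev digit), (prev, pc.2 + pvDist N pc.1 digit)]

theorem get?_condInsA {κ : Type} [BEq κ] [LawfulBEq κ] [DecidableEq κ]
    (nt : PySem.Dict κ Int) (key : κ) (u v : Int) (huv : u = v) (k : κ) :
    (if nt.contains key then nt.insert key (min v (nt.getD key 0)) else nt.insert key u).get? k
      = pvRed (nt.get? k) [(key, v)] k := by
  subst huv
  rw [pvRed_singleton]
  by_cases hc : nt.contains key = true
  · rw [if_pos hc]
    have hs : (nt.get? key).isSome := by rw [← PySem.Dict.contains_eq_isSome_get?]; exact hc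
    cases hg : nt.get? key with
    | none => rw [hg] at hs; simp at hs
    | some w =>
      rw [PySem.Dict.get?_insert]
      have hd : nt.getD key 0 = w := by rw [PySem.Dict.getD_eq_get?_getD, hg]; rfl
      by_cases hk : k = key
      · subst hk
        rw [if_pos rfl, if_pos rfl, hg, hd]
        show _ = some (min w u)
        congr 1; omega
      · rw [if_neg hk, if_neg (fun h => hk h.symm)]
  · rw [if_neg hc]
    have hg : nt.get? key = none := by
      cases hgg : nt.get? key with
      | none => rfl
      | some w =>
        exfalso; apply hc
        rw [PySem.Dict.contains_eq_isSome_get?, hgg]; rfl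
    rw [PySem.Dict.get?_insert]
    by_cases hk : k = key
    · subst hk; rw [if_pos rfl, if_pos rfl, hg]; rfl
    · rw [if_neg hk, if_neg (fun h => hk h.symm)]

theorem get?_bodyA (N : Int) (tree : PySem.Dict (Int × Int) Int) (digit : Int)
    (nt : PySem.Dict (Int × Int) Int) (s : Int × Int) (k : Int × Int) :
    (pvBodyA N tree digit nt s).get? k = pvRed (nt.get? k) (pvContribsA N digit tree s) k := by
  show ((if _ then _ else _) : PySem.Dict (Int × Int) Int).get? k = _
  have h2 := get?_condInsA
    (if nt.contains (digit, s.2) then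
        nt.insert (digit, s.2) (min (tree.getD s 0 + pvDist N digit s.1) (nt.getD (digit, s.2) 0))
      else nt.insert (digit, s.2) (pvDist N digit s.1 + tree.getD s 0))
    (s.1, digit) (pvDist N digit s.2 + tree.getD s 0) (tree.getD s 0 + pvDist N digit s.2)
    (by omega) k
  have h1 := get?_condInsA nt (digit, s.2) (pvDist N digit s.1 + tree.getD s 0)
    (tree.getD s 0 + pvDist N digit s.1) (by omega) k
  rw [show pvContribsA N digit tree s =
      [((digit, s.2), tree.getD s 0 + pvDist N digit s.1)] ++
      [((s.1, digit), tree.getD s 0 + pvDist N digit s.2)] from rfl,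
    pvRed_append, ← h1]
  exact h2

theorem get?_foldA (N : Int) (tree : PySem.Dict (Int × Int) Int) (digit : Int) :
    ∀ (ks : List (Int × Int)) (nt : PySem.Dict (Int × Int) Int) (k : Int × Int),
    ((ks.foldl (pvBodyA N tree digit) nt).get? k)
      = pvRed (nt.get? k) (ks.flatMap (pvContribsA N digit tree)) k := by
  intro ks
  induction ks with
  | nil => intro nt k; rfl
  | cons s ks ih =>
    intro nt k
    rw [List.foldl_cons, ih, List.flatMap_cons, pvRed_append, get?_bodyA]

theorem get?_stepA (N : Int) (tree : PySem.Dict (Int × Int) Int) (digit : Int) (k : Int × Int) :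
    (pvStepA N tree digit).get? k
      = pvRed none (tree.keys.flatMap (pvContribsA N digit tree)) k := by
  rw [pvStepA, get?_foldA, PySem.Dict.get?_empty]

theorem nodup_keys_bodyA (N : Int) (tree : PySem.Dict (Int × Int) Int) (digit : Int)
    (nt : PySem.Dict (Int × Int) Int) (s : Int × Int) (h : nt.keys.Nodup) :
    (pvBodyA N tree digit nt s).keys.Nodup := by
  show (((if _ then _ else _) : PySem.Dict (Int × Int) Int)).keys.Nodup
  split <;> split <;>
    exact PySem.Dict.nodup_keys_insert _ _ _ (PySem.Dict.nodup_keys_insert _ _ _ h)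

theorem nodup_keys_stepA (N : Int) (tree : PySem.Dict (Int × Int) Int) (digit : Int) :
    (pvStepA N tree digit).keys.Nodup := by
  rw [pvStepA]
  have : ∀ (ks : List (Int × Int)) (nt : PySem.Dict (Int × Int) Int), nt.keys.Nodup →
      (ks.foldl (pvBodyA N tree digit) nt).keys.Nodup := by
    intro ks
    induction ks with
    | nil => intro nt h; exact h
    | cons s ks ih => intro nt h; exact ih _ (nodup_keys_bodyA N tree digit nt s h)
  exact this _ _ (by simp [PySem.Dict.keys_empty])

-- ===== invariant machinery =====
theorem pvDist_comm (N a b : Int) : pvDist N a b = pvDist N b a := by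
  unfold pvDist; rw [abs_sub_comm]

def pvOmin : Option Int → Option Int → Option Int
  | none, o => o
  | some v, none => some v
  | some v, some w => some (min v w)

theorem pvOmin_eq_some {o1 o2 : Option Int} {c : Int} (h : pvOmin o1 o2 = some c) :
    (o1 = some c ∨ o2 = some c) ∧ (∀ w, o1 = some w → c ≤ w) ∧ (∀ w, o2 = some w → c ≤ w) := by
  cases o1 with
  | none =>
    cases o2 with
    | none => cases h
    | some w => cases h; exact ⟨Or.inr rfl, by simp, by rintro x hx; cases hx; exact le_refl _⟩
  | some v =>
    cases o2 with
    | none => cases h; exact ⟨Or.inl rfl, by rintro x hx; cases hx; exact le_refl _, by simp⟩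
    | some w =>
      have hc : min v w = c := by cases h; rfl
      refine ⟨?_, by rintro x hx; cases hx; omega, by rintro x hx; cases hx; omega⟩
      rcases min_choice v w with hm | hm
      · exact Or.inl (by rw [← hc, hm])
      · exact Or.inr (by rw [← hc, hm])

theorem pvOmin_some_left {o1 o2 : Option Int} {u : Int} (h : o1 = some u) :
    ∃ c, pvOmin o1 o2 = some c ∧ c ≤ u := by
  subst h
  cases o2 with
  | none => exact ⟨u, rfl, le_refl _⟩
  | some w => exact ⟨min u w, rfl, min_le_left _ _⟩

theorem pvOmin_some_right {o1 o2 : Option Int} {u : Int} (h : o2 = some u) :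
    ∃ c, pvOmin o1 o2 = some c ∧ c ≤ u := by
  subst h
  cases o1 with
  | none => exact ⟨u, rfl, le_refl _⟩
  | some v => exact ⟨min v u, rfl, min_le_right _ _⟩

theorem mem_keys_iff_get? {κ ν : Type} [BEq κ] [LawfulBEq κ] (d : PySem.Dict κ ν) (k : κ) :
    k ∈ d.keys ↔ ∃ v, d.get? k = some v := by
  rw [← PySem.Dict.contains_iff_mem_keys, PySem.Dict.contains_eq_isSome_get?]
  cases d.get? k <;> simp

theorem mem_values_iff_get? {κ ν : Type} [BEq κ] [LawfulBEq κ] (d : PySem.Dict κ ν)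
    (hn : d.keys.Nodup) (v : ν) : v ∈ d.values ↔ ∃ k, d.get? k = some v := by
  constructor
  · intro hv
    have hv' : v ∈ d.items.map (·.2) := hv
    obtain ⟨p, hp, hpv⟩ := List.mem_map.mp hv'
    refine ⟨p.1, PySem.Dict.get?_of_mem_items d ?_ hn⟩
    have : p = (p.1, v) := by rw [← hpv]
    rw [← this]; exact hp
  · rintro ⟨k, hk⟩
    exact List.mem_map.mpr ⟨(k, v), PySem.Dict.mem_items_of_get?_eq_some d hk, rfl⟩

-- A's keys always contain the previous digit
def pvInvK1 (prev : Int) (tree : PySem.Dict (Int × Int) Int) : Prop :=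
  ∀ a b v, tree.get? (a, b) = some v → a = prev ∨ b = prev

-- main invariant: the minimum of B's states at position p equals the combined
-- A-value at the mirrored pair keys
def pvInvF (prev : Int) (tree : PySem.Dict (Int × Int) Int) (st : List (Int × Int)) : Prop :=
  ∀ p, pvRed none st p = pvOmin (tree.get? (prev, p)) (tree.get? (p, prev))

def pvLA (N digit : Int) (tree : PySem.Dict (Int × Int) Int) : List ((Int × Int) × Int) :=
  tree.keys.flatMap (pvContribsA N digit tree)

theorem mem_pvLA {N digit : Int} {tree : PySem.Dict (Int × Int) Int} {q : (Int × Int) × Int} :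
    q ∈ pvLA N digit tree ↔ ∃ s, s ∈ tree.keys ∧
      (q = ((digit, s.2), tree.getD s 0 + pvDist N digit s.1) ∨
       q = ((s.1, digit), tree.getD s 0 + pvDist N digit s.2)) := by
  simp only [pvLA, List.mem_flatMap, pvContribsA, List.mem_cons, List.not_mem_nil, or_false]

theorem mem_flatMap_contribsB {N prev digit : Int} {st : List (Int × Int)} {q : Int × Int} :
    q ∈ st.flatMap (pvContribsB N prev digit) ↔ ∃ pc, pc ∈ st ∧
      (q = (pc.1, pc.2 + pvDist N prev digit) ∨ q = (prev, pc.2 + pvDist N pc.1 digit)) := by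
  simp only [List.mem_flatMap, pvContribsB, List.mem_cons, List.not_mem_nil, or_false]

theorem key_get?_getD {κ : Type} [BEq κ] [LawfulBEq κ] {d : PySem.Dict κ Int} {k : κ}
    (h : k ∈ d.keys) : d.get? k = some (d.getD k 0) := by
  obtain ⟨v, hv⟩ := (mem_keys_iff_get? d k).mp h
  rw [hv, PySem.Dict.getD_eq_get?_getD, hv]; rfl

theorem getD_of_get?_some {κ : Type} [BEq κ] [LawfulBEq κ] {d : PySem.Dict κ Int} {k : κ} {v : Int}
    (h : d.get? k = some v) : d.getD k 0 = v := by
  rw [PySem.Dict.getD_eq_get?_getD, h]; rfl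

-- B's step list reduces to the flatMap of per-state contributions
theorem red_stepBalt (N prev digit : Int) (st : List (Int × Int)) (hst : st ≠ []) (p : Int) :
    pvRed none (pvStepBalt N st (prev, digit)) p
      = pvRed none (st.flatMap (pvContribsB N prev digit)) p := by
  obtain ⟨j, hj⟩ : ∃ j, PySem.List.min? (st.map (fun s => s.2 + pvDist N s.1 digit)) (fun x => x) = some j := by
    cases hm : PySem.List.min? (st.map (fun s => s.2 + pvDist N s.1 digit)) (fun x => x) with
    | none =>
      rw [PySem.List.min?_eq_none_iff] at hm
      cases st with
      | nil => exact absurd rfl hst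
      | cons a l => cases hm
    | some j => exact ⟨j, rfl⟩
  have hjmem : j ∈ st.map (fun s => s.2 + pvDist N s.1 digit) := PySem.List.min?_mem hj
  have hjmin : ∀ y ∈ st.map (fun s => s.2 + pvDist N s.1 digit), j ≤ y := by
    intro y hy; exact PySem.List.min?_isMin hj y hy
  have hstep : pvStepBalt N st (prev, digit)
      = st.map (fun s => (s.1, s.2 + pvDist N prev digit)) ++ [(prev, j)] := by
    show (st.map _ ++ [(prev, (PySem.List.min? _ _).getD 0)]) = _
    rw [hj]
    rfl
  rw [hstep]
  refine pvRed_eq_of_dom ?_ ?_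
  · intro v hv
    rcases List.mem_append.mp hv with hv | hv
    · obtain ⟨pc, hpc, hpe⟩ := List.mem_map.mp hv
      have h1 : pc.1 = p := congrArg Prod.fst hpe
      have h2 : pc.2 + pvDist N prev digit = v := congrArg Prod.snd hpe
      refine ⟨v, mem_flatMap_contribsB.mpr ⟨pc, hpc, Or.inl ?_⟩, le_refl _⟩
      rw [← h1, ← h2]
    · have hpe : ((prev, j) : Int × Int) = (p, v) := (List.mem_singleton.mp hv).symm
      have h1 : prev = p := congrArg Prod.fst hpe
      have h2 : j = v := congrArg Prod.snd hpe
      obtain ⟨pc, hpc, hje⟩ := List.mem_map.mp hjmem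
      refine ⟨j, mem_flatMap_contribsB.mpr ⟨pc, hpc, Or.inr ?_⟩, le_of_eq h2⟩
      rw [← h1, hje]
  · intro v hv
    obtain ⟨pc, hpc, hc | hc⟩ := mem_flatMap_contribsB.mp hv
    · have h1 : pc.1 = p := congrArg Prod.fst hc.symm
      have h2 : v = pc.2 + pvDist N prev digit := congrArg Prod.snd hc
      refine ⟨v, List.mem_append.mpr (Or.inl ?_), le_refl _⟩
      exact List.mem_map.mpr ⟨pc, hpc, by rw [h1, ← h2]⟩
    · have h1 : prev = p := congrArg Prod.fst hc.symm
      have h2 : v = pc.2 + pvDist N pc.1 digit := congrArg Prod.snd hc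
      refine ⟨j, List.mem_append.mpr (Or.inr (by rw [← h1]; exact List.mem_singleton.mpr rfl)), ?_⟩
      rw [h2]
      exact hjmin _ (List.mem_map.mpr ⟨pc, hpc, rfl⟩)

-- each B contribution is dominated by an A contribution at the mirrored keys
theorem pv_transfer_BA {N digit prev : Int} {tree : PySem.Dict (Int × Int) Int}
    {st : List (Int × Int)} (h2 : pvInvF prev tree st)
    {q v : Int} (h : (q, v) ∈ st.flatMap (pvContribsB N prev digit)) :
    ∃ w, (((digit, q), w) ∈ pvLA N digit tree ∨ ((q, digit), w) ∈ pvLA N digit tree) ∧ w ≤ v := by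
  obtain ⟨pc, hpc, hc⟩ := mem_flatMap_contribsB.mp h
  obtain ⟨w0, hw0, hw0le⟩ := pvRed_le_of_mem hpc
  rw [h2 pc.1] at hw0
  have hor := (pvOmin_eq_some hw0).1
  rcases hc with hc | hc
  · have hq : q = pc.1 := congrArg Prod.fst hc
    have hv : v = pc.2 + pvDist N prev digit := congrArg Prod.snd hc
    rcases hor with ho | ho
    · have hk : (prev, pc.1) ∈ tree.keys := (mem_keys_iff_get? _ _).mpr ⟨_, ho⟩
      have hd : tree.getD (prev, pc.1) 0 = w0 := getD_of_get?_some ho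
      refine ⟨w0 + pvDist N digit prev,
        Or.inl (mem_pvLA.mpr ⟨(prev, pc.1), hk, Or.inl (by rw [hq, hd])⟩), ?_⟩
      rw [hv, pvDist_comm N digit prev]; omega
    · have hk : (pc.1, prev) ∈ tree.keys := (mem_keys_iff_get? _ _).mpr ⟨_, ho⟩
      have hd : tree.getD (pc.1, prev) 0 = w0 := getD_of_get?_some ho
      refine ⟨w0 + pvDist N digit prev,
        Or.inr (mem_pvLA.mpr ⟨(pc.1, prev), hk, Or.inr (by rw [hq, hd])⟩), ?_⟩
      rw [hv, pvDist_comm N digit prev]; omega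
  · have hq : q = prev := congrArg Prod.fst hc
    have hv : v = pc.2 + pvDist N pc.1 digit := congrArg Prod.snd hc
    rcases hor with ho | ho
    · have hk : (prev, pc.1) ∈ tree.keys := (mem_keys_iff_get? _ _).mpr ⟨_, ho⟩
      have hd : tree.getD (prev, pc.1) 0 = w0 := getD_of_get?_some ho
      refine ⟨w0 + pvDist N digit pc.1,
        Or.inr (mem_pvLA.mpr ⟨(prev, pc.1), hk, Or.inr (by rw [hq, hd])⟩), ?_⟩
      rw [hv, pvDist_comm N digit pc.1]; omega
    · have hk : (pc.1, prev) ∈ tree.keys := (mem_keys_iff_get? _ _).mpr ⟨_, ho⟩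
      have hd : tree.getD (pc.1, prev) 0 = w0 := getD_of_get?_some ho
      refine ⟨w0 + pvDist N digit pc.1,
        Or.inl (mem_pvLA.mpr ⟨(pc.1, prev), hk, Or.inl (by rw [hq, hd])⟩), ?_⟩
      rw [hv, pvDist_comm N digit pc.1]; omega

-- each A contribution at the mirrored keys is dominated by a B contribution
theorem pv_transfer_AB {N digit prev : Int} {tree : PySem.Dict (Int × Int) Int}
    {st : List (Int × Int)} (h1 : pvInvK1 prev tree) (h2 : pvInvF prev tree st)
    {q w : Int}
    (h : ((digit, q), w) ∈ pvLA N digit tree ∨ ((q, digit), w) ∈ pvLA N digit tree) :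
    ∃ w', (q, w') ∈ st.flatMap (pvContribsB N prev digit) ∧ w' ≤ w := by
  have hpat : ∃ s, s ∈ tree.keys ∧
      ((q = s.2 ∧ w = tree.getD s 0 + pvDist N digit s.1) ∨
       (q = s.1 ∧ w = tree.getD s 0 + pvDist N digit s.2)) := by
    rcases h with h | h <;> obtain ⟨s, hs, hc | hc⟩ := mem_pvLA.mp h
    · have hk : ((digit, q) : Int × Int) = (digit, s.2) := congrArg Prod.fst hc
      have hw : w = tree.getD s 0 + pvDist N digit s.1 := congrArg Prod.snd hc
      exact ⟨s, hs, Or.inl ⟨congrArg Prod.snd hk, hw⟩⟩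
    · have hk : ((digit, q) : Int × Int) = (s.1, digit) := congrArg Prod.fst hc
      have hw : w = tree.getD s 0 + pvDist N digit s.2 := congrArg Prod.snd hc
      have h1e : digit = s.1 := congrArg Prod.fst hk
      have h2e : q = digit := congrArg Prod.snd hk
      exact ⟨s, hs, Or.inr ⟨h2e.trans h1e, hw⟩⟩
    · have hk : ((q, digit) : Int × Int) = (digit, s.2) := congrArg Prod.fst hc
      have hw : w = tree.getD s 0 + pvDist N digit s.1 := congrArg Prod.snd hc
      have h1e : q = digit := congrArg Prod.fst hk
      have h2e : digit = s.2 := congrArg Prod.snd hk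
      exact ⟨s, hs, Or.inl ⟨h1e.trans h2e, hw⟩⟩
    · have hk : ((q, digit) : Int × Int) = (s.1, digit) := congrArg Prod.fst hc
      have hw : w = tree.getD s 0 + pvDist N digit s.2 := congrArg Prod.snd hc
      exact ⟨s, hs, Or.inr ⟨congrArg Prod.fst hk, hw⟩⟩
  obtain ⟨s, hsk, hpat⟩ := hpat
  have hg : tree.get? s = some (tree.getD s 0) := key_get?_getD hsk
  have hps : s = (s.1, s.2) := rfl
  have hK1 := h1 s.1 s.2 _ (by rw [← hps]; exact hg)
  rcases hpat with ⟨hq, hw⟩ | ⟨hq, hw⟩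
  · rcases hK1 with hsp | hsp
    · have hgq : tree.get? (prev, q) = some (tree.getD s 0) := by
        rw [← hsp, hq, ← hps]; exact hg
      obtain ⟨c', hc', hle⟩ := pvOmin_some_left (o2 := tree.get? (q, prev)) hgq
      rw [← h2 q] at hc'
      refine ⟨c' + pvDist N prev digit,
        mem_flatMap_contribsB.mpr ⟨(q, c'), pvRed_attained hc', Or.inl rfl⟩, ?_⟩
      rw [hw, ← hsp, pvDist_comm N s.1 digit]; omega
    · have hgq : tree.get? (s.1, prev) = some (tree.getD s 0) := by
        rw [← hsp, ← hps]; exact hg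
      obtain ⟨c', hc', hle⟩ := pvOmin_some_right (o1 := tree.get? (prev, s.1)) hgq
      rw [← h2 s.1] at hc'
      refine ⟨c' + pvDist N s.1 digit, ?_, ?_⟩
      · rw [hq, hsp]
        exact mem_flatMap_contribsB.mpr ⟨(s.1, c'), pvRed_attained hc', Or.inr rfl⟩
      · rw [hw, pvDist_comm N s.1 digit]; omega
  · rcases hK1 with hsp | hsp
    · have hgq : tree.get? (prev, s.2) = some (tree.getD s 0) := by
        rw [← hsp, ← hps]; exact hg
      obtain ⟨c', hc', hle⟩ := pvOmin_some_left (o2 := tree.get? (s.2, prev)) hgq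
      rw [← h2 s.2] at hc'
      refine ⟨c' + pvDist N s.2 digit, ?_, ?_⟩
      · rw [hq, hsp]
        exact mem_flatMap_contribsB.mpr ⟨(s.2, c'), pvRed_attained hc', Or.inr rfl⟩
      · rw [hw, pvDist_comm N s.2 digit]; omega
    · have hgq : tree.get? (q, prev) = some (tree.getD s 0) := by
        rw [← hsp, hq, ← hps]; exact hg
      obtain ⟨c', hc', hle⟩ := pvOmin_some_right (o1 := tree.get? (prev, q)) hgq
      rw [← h2 q] at hc'
      refine ⟨c' + pvDist N prev digit,
        mem_flatMap_contribsB.mpr ⟨(q, c'), pvRed_attained hc', Or.inl rfl⟩, ?_⟩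
      rw [hw, ← hsp, pvDist_comm N s.2 digit]; omega

-- ===== step preservation =====
theorem pv_step_K1 (N digit : Int) (tree : PySem.Dict (Int × Int) Int) :
    pvInvK1 digit (pvStepA N tree digit) := by
  intro a b v h
  rw [get?_stepA] at h
  have hmem : ((a, b), v) ∈ pvLA N digit tree := pvRed_attained h
  obtain ⟨s, _, hc | hc⟩ := mem_pvLA.mp hmem
  · exact Or.inl (congrArg Prod.fst (congrArg Prod.fst hc))
  · exact Or.inr (congrArg Prod.snd (congrArg Prod.fst hc))

theorem pv_step_F (N digit prev : Int) (tree : PySem.Dict (Int × Int) Int)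
    (st : List (Int × Int)) (h1 : pvInvK1 prev tree) (h2 : pvInvF prev tree st)
    (hst : st ≠ []) :
    pvInvF digit (pvStepA N tree digit) (pvStepBalt N st (prev, digit)) := by
  intro q
  rw [red_stepBalt N prev digit st hst, get?_stepA, get?_stepA]
  show pvRed none (st.flatMap (pvContribsB N prev digit)) q
      = pvOmin (pvRed none (pvLA N digit tree) (digit, q)) (pvRed none (pvLA N digit tree) (q, digit))
  cases hB : pvRed none (st.flatMap (pvContribsB N prev digit)) q with
  | none =>
    have hall := ((pvRed_eq_none_iff _ _ _).mp hB).2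
    have hA1 : pvRed none (pvLA N digit tree) (digit, q) = none := by
      cases hA : pvRed none (pvLA N digit tree) (digit, q) with
      | none => rfl
      | some v =>
        exfalso
        obtain ⟨w', hw', _⟩ := pv_transfer_AB h1 h2 (Or.inl (pvRed_attained hA))
        exact hall (q, w') hw' rfl
    have hA2 : pvRed none (pvLA N digit tree) (q, digit) = none := by
      cases hA : pvRed none (pvLA N digit tree) (q, digit) with
      | none => rfl
      | some v =>
        exfalso
        obtain ⟨w', hw', _⟩ := pv_transfer_AB h1 h2 (Or.inr (pvRed_attained hA))
        exact hall (q, w') hw' rfl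
    rw [hA1, hA2]; rfl
  | some v =>
    have hattB : (q, v) ∈ st.flatMap (pvContribsB N prev digit) := pvRed_attained hB
    have hbnd := (pvRed_some_spec hB).2.2
    have hbound : ∀ w, (((digit, q), w) ∈ pvLA N digit tree ∨
        ((q, digit), w) ∈ pvLA N digit tree) → v ≤ w := by
      intro w hw
      obtain ⟨w', hm, hle⟩ := pv_transfer_AB h1 h2 hw
      exact le_trans (hbnd (q, w') hm rfl) hle
    have hboundA1 : ∀ p ∈ pvLA N digit tree, p.1 = (digit, q) → v ≤ p.2 := by
      intro p hp hpk
      refine hbound p.2 (Or.inl ?_)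
      have : p = ((digit, q), p.2) := by rw [← hpk]
      rw [← this]; exact hp
    have hboundA2 : ∀ p ∈ pvLA N digit tree, p.1 = (q, digit) → v ≤ p.2 := by
      intro p hp hpk
      refine hbound p.2 (Or.inr ?_)
      have : p = ((q, digit), p.2) := by rw [← hpk]
      rw [← this]; exact hp
    obtain ⟨w, hm, hwle⟩ := pv_transfer_BA h2 hattB
    have hwv : w = v := by
      have := hbound w hm
      omega
    rw [hwv] at hm
    rcases hm with hm | hm
    · have hA1 : pvRed none (pvLA N digit tree) (digit, q) = some v :=
        pvRed_eq_some (Or.inr hm) (by simp) hboundA1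
      rw [hA1]
      cases hA2 : pvRed none (pvLA N digit tree) (q, digit) with
      | none => rfl
      | some w2 =>
        have hvw : v ≤ w2 := hbound w2 (Or.inr (pvRed_attained hA2))
        show some v = some (min v w2)
        rw [min_eq_left hvw]
    · have hA2 : pvRed none (pvLA N digit tree) (q, digit) = some v :=
        pvRed_eq_some (Or.inr hm) (by simp) hboundA2
      rw [hA2]
      cases hA1 : pvRed none (pvLA N digit tree) (digit, q) with
      | none => rfl
      | some w2 =>
        have hvw : v ≤ w2 := hbound w2 (Or.inl (pvRed_attained hA1))
        show some v = some (min w2 v)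
        rw [min_eq_right hvw]

theorem pv_step_ne (N digit : Int) (tree : PySem.Dict (Int × Int) Int)
    (hne : ∃ k v, tree.get? k = some v) :
    ∃ k v, (pvStepA N tree digit).get? k = some v := by
  obtain ⟨k, v, hk⟩ := hne
  have hkk : k ∈ tree.keys := (mem_keys_iff_get? _ _).mpr ⟨v, hk⟩
  have hmem : ((digit, k.2), tree.getD k 0 + pvDist N digit k.1) ∈ pvLA N digit tree :=
    mem_pvLA.mpr ⟨k, hkk, Or.inl rfl⟩
  cases hA : pvRed none (pvLA N digit tree) (digit, k.2) with
  | none =>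
    exfalso
    exact ((pvRed_eq_none_iff _ _ _).mp hA).2 _ hmem rfl
  | some v' =>
    exact ⟨(digit, k.2), v', by rw [get?_stepA]; exact hA⟩

theorem stepBalt_ne (N : Int) (st : List (Int × Int)) (pc : Int × Int) :
    pvStepBalt N st pc ≠ [] := by
  simp [pvStepBalt]

-- ===== base case =====
theorem pv_base_K1 (N c0 : Int) :
    pvInvK1 c0 (PySem.Dict.empty.insert (c0, 1) (pvDist N c0 1)) := by
  intro a b v h
  rw [PySem.Dict.get?_insert] at h
  split at h
  · rename_i he
    exact Or.inl (congrArg Prod.fst he)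
  · rw [PySem.Dict.get?_empty] at h; cases h

theorem pv_base_F (N c0 : Int) :
    pvInvF c0 (PySem.Dict.empty.insert (c0, 1) (pvDist N c0 1)) [(1, pvDist N 1 c0)] := by
  intro p
  rw [pvRed_singleton, PySem.Dict.get?_insert, PySem.Dict.get?_insert,
    PySem.Dict.get?_empty, PySem.Dict.get?_empty]
  by_cases hp : p = 1
  · subst hp
    by_cases hc : c0 = 1
    · subst hc
      simp only [if_pos trivial]
      show some (pvDist N 1 1) = some (min (pvDist N 1 1) (pvDist N 1 1))
      rw [min_self]
    · have hne : ¬((1, c0) : Int × Int) = (c0, 1) := fun he => hc (congrArg Prod.fst he).symm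
      rw [if_pos rfl, if_pos rfl, if_neg hne]
      show some (pvDist N 1 c0) = some (pvDist N c0 1)
      rw [pvDist_comm]
  · have hp1 : ¬((1 : Int) = p) := fun he => hp he.symm
    have hne1 : ¬((c0, p) : Int × Int) = (c0, 1) := fun he => hp (congrArg Prod.snd he)
    have hne2 : ¬((p, c0) : Int × Int) = (c0, 1) :=
      fun he => hp ((congrArg Prod.fst he).trans (congrArg Prod.snd he))
    rw [if_neg hp1, if_neg hne1, if_neg hne2]
    rfl

theorem pv_base_ne (N c0 : Int) :
    ∃ k v, (PySem.Dict.empty.insert (c0, 1) (pvDist N c0 1) : PySem.Dict (Int × Int) Int).get? k = some v :=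
  ⟨(c0, 1), pvDist N c0 1, PySem.Dict.get?_insert_self _ _ _⟩

-- ===== the final min over values =====
theorem pv_min_values_eq (prev : Int) (tree : PySem.Dict (Int × Int) Int)
    (st : List (Int × Int)) (h1 : pvInvK1 prev tree) (h2 : pvInvF prev tree st)
    (hnT : tree.keys.Nodup) (hne : ∃ k v, tree.get? k = some v) :
    (PySem.List.min? tree.values (fun x => x)).getD 0
      = (PySem.List.min? (st.map (fun s => s.2)) (fun x => x)).getD 0 := by
  have hTval : ∃ v, v ∈ tree.values := by
    obtain ⟨k, v, hk⟩ := hne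
    exact ⟨v, (mem_values_iff_get? tree hnT v).mpr ⟨k, hk⟩⟩
  have hDval : ∃ v, v ∈ st.map (fun s => s.2) := by
    obtain ⟨k, v, hk⟩ := hne
    have hps : k = (k.1, k.2) := rfl
    rcases h1 k.1 k.2 v (by rw [← hps]; exact hk) with hkp | hkp
    · have : tree.get? (prev, k.2) = some v := by rw [← hkp, ← hps]; exact hk
      obtain ⟨c', hc', _⟩ := pvOmin_some_left (o2 := tree.get? (k.2, prev)) this
      rw [← h2 k.2] at hc'
      exact ⟨c', List.mem_map.mpr ⟨(k.2, c'), pvRed_attained hc', rfl⟩⟩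
    · have : tree.get? (k.1, prev) = some v := by rw [← hkp, ← hps]; exact hk
      obtain ⟨c', hc', _⟩ := pvOmin_some_right (o1 := tree.get? (prev, k.1)) this
      rw [← h2 k.1] at hc'
      exact ⟨c', List.mem_map.mpr ⟨(k.1, c'), pvRed_attained hc', rfl⟩⟩
  obtain ⟨vT, hvT⟩ := hTval
  obtain ⟨vD, hvD⟩ := hDval
  cases hmT : PySem.List.min? tree.values (fun x => x) with
  | none => exact absurd ((PySem.List.min?_eq_none_iff _ _).mp hmT ▸ hvT) (List.not_mem_nil)
  | some mT =>
  cases hmD : PySem.List.min? (st.map (fun s => s.2)) (fun x => x) with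
  | none => exact absurd ((PySem.List.min?_eq_none_iff _ _).mp hmD ▸ hvD) (List.not_mem_nil)
  | some mD =>
  have hTmem := PySem.List.min?_mem hmT
  have hDmem := PySem.List.min?_mem hmD
  have hTmin := PySem.List.min?_isMin hmT
  have hDmin := PySem.List.min?_isMin hmD
  -- mT ≤ mD
  have h_md : mT ≤ mD := by
    obtain ⟨pc, hpc, hpcv⟩ := List.mem_map.mp hDmem
    obtain ⟨w, hw, hwle⟩ := pvRed_le_of_mem hpc
    rw [h2 pc.1] at hw
    rcases (pvOmin_eq_some hw).1 with ho | ho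
    · have : mT ≤ w := hTmin w ((mem_values_iff_get? tree hnT w).mpr ⟨_, ho⟩)
      omega
    · have : mT ≤ w := hTmin w ((mem_values_iff_get? tree hnT w).mpr ⟨_, ho⟩)
      omega
  -- mD ≤ mT
  have h_dm : mD ≤ mT := by
    obtain ⟨k, hk⟩ := (mem_values_iff_get? tree hnT mT).mp hTmem
    have hps : k = (k.1, k.2) := rfl
    rcases h1 k.1 k.2 mT (by rw [← hps]; exact hk) with hkp | hkp
    · have hg : tree.get? (prev, k.2) = some mT := by rw [← hkp, ← hps]; exact hk
      obtain ⟨c', hc', hle⟩ := pvOmin_some_left (o2 := tree.get? (k.2, prev)) hg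
      rw [← h2 k.2] at hc'
      have : mD ≤ c' := hDmin c' (List.mem_map.mpr ⟨(k.2, c'), pvRed_attained hc', rfl⟩)
      omega
    · have hg : tree.get? (k.1, prev) = some mT := by rw [← hkp, ← hps]; exact hk
      obtain ⟨c', hc', hle⟩ := pvOmin_some_right (o1 := tree.get? (prev, k.1)) hg
      rw [← h2 k.1] at hc'
      have : mD ≤ c' := hDmin c' (List.mem_map.mpr ⟨(k.1, c'), pvRed_attained hc', rfl⟩)
      omega
  have : mT = mD := le_antisymm h_md h_dm
  rw [this]

-- ===== the simultaneous fold =====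
theorem pv_main_fold (N : Int) (l : List Int) :
    ∀ (tree : PySem.Dict (Int × Int) Int) (st : List (Int × Int)) (prev : Int),
    pvInvK1 prev tree → pvInvF prev tree st → tree.keys.Nodup → st ≠ [] →
    (∃ k v, tree.get? k = some v) →
    ∃ prevF,
      pvInvK1 prevF (l.foldl (pvStepA N) tree) ∧
      pvInvF prevF (l.foldl (pvStepA N) tree)
        (((prev :: l).zip l).foldl (pvStepBalt N) st) ∧
      (l.foldl (pvStepA N) tree).keys.Nodup ∧
      (∃ k v, (l.foldl (pvStepA N) tree).get? k = some v) := by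
  induction l with
  | nil =>
    intro tree st prev h1 h2 hnT _ hne
    exact ⟨prev, h1, h2, hnT, hne⟩
  | cons d l ih =>
    intro tree st prev h1 h2 hnT hst hne
    have hz : ((prev :: d :: l).zip (d :: l)) = (prev, d) :: ((d :: l).zip l) := rfl
    rw [List.foldl_cons, hz, List.foldl_cons]
    exact ih (pvStepA N tree d) (pvStepBalt N st (prev, d)) d
      (pv_step_K1 N d tree)
      (pv_step_F N d prev tree st h1 h2 hst)
      (nodup_keys_stepA N tree d)
      (stepBalt_ne N st (prev, d))
      (pv_step_ne N d tree hne)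

-- ===== VERDICT (by name: the statement is the Claim_ definition above) =====
theorem getMinCodeEntryTime_spec : Claim_equal_getMinCodeEntryTime := by
  intro N M C _hDom hPre
  unfold Spec_getMinCodeEntryTime
  cases C with
  | nil => exact absurd rfl hPre
  | cons c rest =>
    have hget : PySem.List.pyGetD (c :: rest) 0 0 = c := by simp [pysem]
    have hsl : PySem.List.slice (c :: rest) (some 1) none = rest := by
      rw [PySem.List.slice_from_one]; rfl
    simp only [getMinCodeEntryTime, getMinCodeEntryTime_alt, hget, hsl]
    obtain ⟨prevF, hK1, hF, hnT, hne⟩ := pv_main_fold N rest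
      (PySem.Dict.empty.insert (c, 1) (pvDist N c 1))
      [(1, pvDist N 1 c)] c
      (pv_base_K1 N c) (pv_base_F N c)
      (PySem.Dict.nodup_keys_insert _ _ _ (by simp [PySem.Dict.keys_empty]))
      (by simp)
      (pv_base_ne N c)
    exact pv_min_values_eq _ _ _ hK1 hF hnT hne
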